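-- pv_equiv track=rewrite | github.com/alstjrwjd99/BaekJun | 프로그래머스/2/250136. ［PCCP 기출문제］ 2번 ／ 석유 시추/［PCCP 기출문제］ 2번 ／ 석유 시추.py | solution
-- ===== SOURCE A (Python) =====
-- from collections import deque
--
-- def solution(land):
--     answer = 0
--     n = len(land)
--     m = len(land[0])
--     dxs = [-1,1,0,0]
--     dys = [0,0,1,-1]
--     result = [0 for i in range(m+1)]
--     visited = [[0 for i in range(m)] for j in range(n)]
--
--     def in_range (x,y):
--         return 0<=x<n and 0<=y<m
--
--     def bfs(i,j):
--         visited[i][j] = 1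
--         queue = deque([(i,j)])
--         min_y, max_y =j, j
--         count = 0
--         while queue:
--             x,y = queue.popleft()
--
--             min_y = min(min_y, y)
--             max_y = max(max_y, y)
--             count += 1
--             for dx,dy in zip(dxs, dys):
--                 nx , ny =  x + dx , y + dy
--                 if in_range(nx,ny) and land[nx][ny] == 1 and visited[nx][ny] == 0:
--                     queue.append((nx,ny))
--                     visited[nx][ny] = 1
--         for i in range(min_y, max_y+1):
--             result[i] += count
--
--         return visited
--
--     for i in range(n):
--         for j in range(m):
--             if visited[i][j] == 0 and land[i][j] == 1:
--                 bfs(i,j)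
--     answer = max(result)
--     return answer
-- ===== SOURCE B (Python) =====
-- def solution(land):
--     n = len(land)
--     m = len(land[0])
--     seen = set()
--     comps = []  # per component: (cell count, min column, max column)
--     for i in range(n):
--         for j in range(m):
--             if land[i][j] == 1 and (i, j) not in seen:
--                 seen.add((i, j))
--                 stack = [(i, j)]
--                 cnt, mn, mx = 0, j, j
--                 while stack:
--                     x, y = stack.pop()
--                     cnt += 1
--                     mn = min(mn, y)
--                     mx = max(mx, y)
--                     for c in ((x - 1, y), (x + 1, y), (x, y - 1), (x, y + 1)):
--                         if 0 <= c[0] < n and 0 <= c[1] < m and land[c[0]][c[1]] == 1 and c not in seen: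
--                             seen.add(c)
--                             stack.append(c)
--                 comps.append((cnt, mn, mx))
--     best = 0
--     for c in range(m):
--         s = sum(cnt for cnt, mn, mx in comps if mn <= c <= mx)
--         if best < s:
--             best = s
--     return best
-- ===== Notes on version B (the rewrite author's own statement) =====
-- stated objective: alternative
-- what changed: BFS flood fill over a visited matrix with an in-place interval-add result array is replaced by stack-based DFS over a visited set that records per-component (count, min column, max column) tuples, with the answer computed afterwards as the max over columns of the sum of counts of components spanning that column.
import Mathlib
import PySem

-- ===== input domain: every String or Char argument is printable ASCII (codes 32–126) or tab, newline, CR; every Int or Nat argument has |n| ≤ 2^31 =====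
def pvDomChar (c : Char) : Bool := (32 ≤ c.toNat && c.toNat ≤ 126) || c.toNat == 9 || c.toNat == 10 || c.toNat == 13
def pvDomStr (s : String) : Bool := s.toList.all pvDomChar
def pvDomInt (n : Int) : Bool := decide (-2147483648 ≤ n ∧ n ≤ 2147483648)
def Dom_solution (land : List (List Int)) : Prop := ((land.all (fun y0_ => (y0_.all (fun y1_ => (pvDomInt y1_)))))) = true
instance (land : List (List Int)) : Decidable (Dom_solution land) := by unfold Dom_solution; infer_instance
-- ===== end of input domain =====

-- B replaces A's BFS flood fill (visited matrix, interval adds into a result array) by a stack DFS over a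
-- visited set collecting per-component (count, min col, max col) records, aggregated per column afterwards.

-- ===== PORT A =====

-- land[x][y] (both ports): some v when in range, none where Python would raise IndexError
def pvAt (g : List (List Int)) (x y : Int) : Option Int :=
  (PySem.List.pyGet? g x).bind (fun r => PySem.List.pyGet? r y)

-- visited[x][y] = 1 (always used under the in_range guard, where it is exact)
def pvSetCell (g : List (List Int)) (x y : Int) : List (List Int) :=
  PySem.List.pySetD g x (PySem.List.pySetD (PySem.List.pyGetD g x []) y 1)

-- A's 'while queue' loop; fuel = n*m+1 is a pure totality guard (proved sufficient below)
def pvBfsLoop (land : List (List Int)) (n m : Int) :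
    Nat → List (Int × Int) → List (List Int) → Int → Int → Int →
    List (List Int) × Int × Int × Int
  | 0, _, vis, mn, mx, cnt => (vis, mn, mx, cnt)
  | _ + 1, [], vis, mn, mx, cnt => (vis, mn, mx, cnt)
  | f + 1, (x, y) :: rest, vis, mn, mx, cnt =>
    let mn := min mn y
    let mx := max mx y
    let cnt := cnt + 1
    let st := [((-1 : Int), (0 : Int)), (1, 0), (0, 1), (0, -1)].foldl
      (fun (s : List (Int × Int) × List (List Int)) d =>
        let nx := x + d.1
        let ny := y + d.2
        if (0 ≤ nx ∧ nx < n ∧ 0 ≤ ny ∧ ny < m) ∧ pvAt land nx ny = some 1 ∧ pvAt s.2 nx ny = some 0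
        then (s.1 ++ [(nx, ny)], pvSetCell s.2 nx ny)
        else s) (rest, vis)
    pvBfsLoop land n m f st.1 st.2 mn mx cnt

-- A's bfs(i, j): returns the new visited matrix and the updated result list
def pvBfs (land : List (List Int)) (n m i j : Int)
    (visited : List (List Int)) (result : List Int) : List (List Int) × List Int :=
  let visited := pvSetCell visited i j
  let r := pvBfsLoop land n m (n.toNat * m.toNat + 1) [(i, j)] visited j j 0
  let res := (PySem.List.pyRange r.2.1 (r.2.2.1 + 1) 1).foldl
    (fun res c => PySem.List.pySetD res c (PySem.List.pyGetD res c 0 + r.2.2.2)) result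
  (r.1, res)

def solution (land : List (List Int)) : Int :=
  match PySem.List.pyGet? land 0 with
  | none => 0   -- land[0]: IndexError (excluded by Pre_solution)
  | some row0 =>
    let n : Int := PySem.List.len land
    let m : Int := PySem.List.len row0
    let result : List Int := (PySem.List.pyRange 0 (m + 1) 1).map (fun _ => 0)
    let visited : List (List Int) :=
      (PySem.List.pyRange 0 n 1).map (fun _ => (PySem.List.pyRange 0 m 1).map (fun _ => (0 : Int)))
    let st := (PySem.List.pyRange 0 n 1).foldl
      (fun (s : List (List Int) × List Int) i =>
        (PySem.List.pyRange 0 m 1).foldl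
          (fun (s : List (List Int) × List Int) j =>
            if pvAt s.1 i j = some 0 ∧ pvAt land i j = some 1
            then pvBfs land n m i j s.1 s.2
            else s) s) (visited, result)
    (PySem.List.max? st.2 (fun v => v)).getD 0   -- max(result); result is never empty

-- ===== PORT B =====

-- B's 'while stack' loop (stack.pop() pops from the right); same fuel totality guard
def pvDfsLoop (land : List (List Int)) (n m : Int) :
    Nat → List (Int × Int) → PySem.Set (Int × Int) → Int → Int → Int →
    PySem.Set (Int × Int) × Int × Int × Int
  | 0, _, seen, cnt, mn, mx => (seen, cnt, mn, mx)
  | f + 1, stack, seen, cnt, mn, mx =>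
    match stack.getLast? with
    | none => (seen, cnt, mn, mx)
    | some (x, y) =>
      let stack := stack.dropLast
      let cnt := cnt + 1
      let mn := min mn y
      let mx := max mx y
      let st := [(x - 1, y), (x + 1, y), (x, y - 1), (x, y + 1)].foldl
        (fun (s : PySem.Set (Int × Int) × List (Int × Int)) c =>
          if (0 ≤ c.1 ∧ c.1 < n ∧ 0 ≤ c.2 ∧ c.2 < m) ∧ pvAt land c.1 c.2 = some 1 ∧ ¬ c ∈ s.1
          then (PySem.Set.add s.1 c, s.2 ++ [c])
          else s) (seen, stack)
      pvDfsLoop land n m f st.2 st.1 cnt mn mx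

def solution_alt (land : List (List Int)) : Int :=
  match PySem.List.pyGet? land 0 with
  | none => 0   -- land[0]: IndexError (excluded by Pre_solution)
  | some row0 =>
    let n : Int := PySem.List.len land
    let m : Int := PySem.List.len row0
    let st := (PySem.List.pyRange 0 n 1).foldl
      (fun (s : PySem.Set (Int × Int) × List (Int × Int × Int)) i =>
        (PySem.List.pyRange 0 m 1).foldl
          (fun (s : PySem.Set (Int × Int) × List (Int × Int × Int)) j =>
            if pvAt land i j = some 1 ∧ ¬ (i, j) ∈ s.1 then
              let seen := PySem.Set.add s.1 (i, j)
              let r := pvDfsLoop land n m (n.toNat * m.toNat + 1) [(i, j)] seen 0 j j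
              (r.1, s.2 ++ [(r.2.1, r.2.2.1, r.2.2.2)])
            else s) s) (PySem.Set.empty, [])
    (PySem.List.pyRange 0 m 1).foldl
      (fun (best : Int) c =>
        let s := ((st.2.filter (fun t => decide (t.2.1 ≤ c ∧ c ≤ t.2.2))).map (fun t => t.1)).sum
        if best < s then s else best) 0

-- ===== PRECONDITION & SPEC =====
-- Pre_ excludes exactly the inputs where the Python A raises IndexError: the empty grid (land[0])
-- and grids with some row shorter than the first row (land[i][j] for j < len(land[0])).
def Pre_solution (land : List (List Int)) : Prop :=
  land ≠ [] ∧ ∀ row ∈ land, land.headI.length ≤ row.length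
instance (land : List (List Int)) : Decidable (Pre_solution land) := by unfold Pre_solution; infer_instance

def pvWitness_solution : List (List Int) := [[1, 0, 1], [1, 1, 0]]

def Spec_solution (land : List (List Int)) (out : Int) : Prop := out = solution_alt land
instance (land : List (List Int)) (out : Int) : Decidable (Spec_solution land out) := by unfold Spec_solution; infer_instance

-- ===== CLAIM (what is proved, stated in full; the proofs are below) =====
def Claim_equal_solution : Prop := ∀ (land : List (List Int)), Dom_solution land → Pre_solution land → Spec_solution land (solution land)

-- ===== LEMMAS AND PROOFS =====


-- cell (x, y) is on the grid and holds oil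
def okB (land : List (List Int)) (n m : Int) (p : Int × Int) : Bool :=
  decide (0 ≤ p.1 ∧ p.1 < n ∧ 0 ≤ p.2 ∧ p.2 < m) && decide (pvAt land p.1 p.2 = some 1)

-- orthogonally adjacent oil cells
def adjB (land : List (List Int)) (n m : Int) (p q : Int × Int) : Bool :=
  okB land n m p && okB land n m q && decide ((q.1 - p.1).natAbs + (q.2 - p.2).natAbs = 1)

-- one flood-fill step that may not enter 'avoid'
def Stp (land : List (List Int)) (n m : Int) (avoid : Finset (Int × Int)) (p q : Int × Int) : Prop :=
  adjB land n m p q = true ∧ q ∉ avoid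

noncomputable def okFinset (land : List (List Int)) (n m : Int) : Finset (Int × Int) :=
  ((Finset.Icc 0 (n - 1)) ×ˢ (Finset.Icc 0 (m - 1))).filter (fun p => okB land n m p = true)

def InReach (land : List (List Int)) (n m : Int) (avoid Q : Finset (Int × Int)) (p : Int × Int) : Prop :=
  ∃ q ∈ Q, Relation.ReflTransGen (Stp land n m avoid) q p

lemma okB_mem_okFinset (land : List (List Int)) (n m : Int) (p : Int × Int)
    (h : okB land n m p = true) : p ∈ okFinset land n m := by
  simp only [okB, Bool.and_eq_true, decide_eq_true_eq] at h
  simp only [okFinset, Finset.mem_filter, Finset.mem_product, Finset.mem_Icc, okB,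
    Bool.and_eq_true, decide_eq_true_eq]
  exact ⟨⟨by omega, by omega⟩, h⟩

lemma inReach_mem_union (land : List (List Int)) (n m : Int) (avoid Q : Finset (Int × Int))
    (p : Int × Int) (h : InReach land n m avoid Q p) : p ∈ Q ∪ okFinset land n m := by
  obtain ⟨q, hq, hr⟩ := h
  rcases Relation.ReflTransGen.cases_tail hr with h1 | ⟨c, _, hstep⟩
  · subst h1; exact Finset.mem_union_left _ hq
  · refine Finset.mem_union_right _ (okB_mem_okFinset _ _ _ _ ?_)
    have := hstep.1
    simp only [adjB, Bool.and_eq_true] at this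
    exact this.1.2

lemma reach_finite (land : List (List Int)) (n m : Int) (avoid Q : Finset (Int × Int)) :
    Set.Finite {p | InReach land n m avoid Q p} :=
  Set.Finite.subset (Q ∪ okFinset land n m).finite_toSet
    (fun p hp => inReach_mem_union land n m avoid Q p hp)

noncomputable def reachF (land : List (List Int)) (n m : Int) (avoid Q : Finset (Int × Int)) :
    Finset (Int × Int) :=
  (reach_finite land n m avoid Q).toFinset

lemma mem_reachF (land : List (List Int)) (n m : Int) (avoid Q : Finset (Int × Int))
    (p : Int × Int) : p ∈ reachF land n m avoid Q ↔ InReach land n m avoid Q p := by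
  simp [reachF, Set.Finite.mem_toFinset, Set.mem_setOf_eq]

lemma reachF_subset_ok (land : List (List Int)) (n m : Int) (avoid Q : Finset (Int × Int))
    (hQ : ∀ q ∈ Q, okB land n m q = true) (p : Int × Int)
    (hp : p ∈ reachF land n m avoid Q) : okB land n m p = true := by
  rw [mem_reachF] at hp
  obtain ⟨q, hq, hr⟩ := hp
  rcases Relation.ReflTransGen.cases_tail hr with h1 | ⟨c, _, hstep⟩
  · subst h1; exact hQ _ hq
  · have := hstep.1
    simp only [adjB, Bool.and_eq_true] at this
    exact this.1.2

-- the visited matrix that marks exactly the cells of s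
def mkVis (n m : Int) (s : Finset (Int × Int)) : List (List Int) :=
  (PySem.List.pyRange 0 n 1).map
    (fun i => (PySem.List.pyRange 0 m 1).map (fun j => if (i, j) ∈ s then (1 : Int) else 0))

lemma at_mkVis (n m : Int) (s : Finset (Int × Int)) (x y : Int)
    (hx0 : 0 ≤ x) (hxn : x < n) (hy0 : 0 ≤ y) (hym : y < m) :
    pvAt (mkVis n m s) x y = some (if (x, y) ∈ s then (1 : Int) else 0) := by
  have hxlen : x.toNat < (PySem.List.pyRange 0 n 1).length := by
    rw [PySem.List.length_pyRange_one]; omega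
  have hylen : y.toNat < (PySem.List.pyRange 0 m 1).length := by
    rw [PySem.List.length_pyRange_one]; omega
  simp only [pvAt, mkVis]
  rw [PySem.List.pyGet?_of_nonneg _ hx0, List.getElem?_map,
    List.getElem?_eq_getElem hxlen]
  simp only [Option.map_some, Option.bind_some]
  rw [PySem.List.pyGet?_of_nonneg _ hy0, List.getElem?_map,
    List.getElem?_eq_getElem hylen]
  simp only [PySem.List.getElem_pyRange_one, Option.map_some, Option.some.injEq]
  have hx : (0 : Int) + x.toNat = x := by omega
  have hy : (0 : Int) + y.toNat = y := by omega
  rw [hx, hy]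

lemma mkRow_insert_ne (m x y i : Int) (s : Finset (Int × Int)) (h : i ≠ x) :
    (PySem.List.pyRange 0 m 1).map (fun j => if ((i, j) : Int × Int) ∈ insert (x, y) s then (1 : Int) else 0)
      = (PySem.List.pyRange 0 m 1).map (fun j => if ((i, j) : Int × Int) ∈ s then (1 : Int) else 0) := by
  apply List.map_congr_left
  intro j _
  have hiff : ((i, j) : Int × Int) ∈ insert (x, y) s ↔ (i, j) ∈ s := by
    simp [Finset.mem_insert, Prod.ext_iff, h]
  exact if_congr hiff rfl rfl

lemma mkRow_set (m x y : Int) (s : Finset (Int × Int)) (hy0 : 0 ≤ y) (hym : y < m) :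
    ((PySem.List.pyRange 0 m 1).map (fun j => if ((x, j) : Int × Int) ∈ s then (1 : Int) else 0)).set y.toNat 1
      = (PySem.List.pyRange 0 m 1).map (fun j => if ((x, j) : Int × Int) ∈ insert (x, y) s then (1 : Int) else 0) := by
  apply List.ext_getElem (by simp)
  intro l h1 h2
  simp only [List.getElem_set, List.getElem_map, PySem.List.getElem_pyRange_one]
  by_cases hly : y.toNat = l
  · rw [if_pos hly]
    have hl : (0 : Int) + ↑l = y := by omega
    simp [hl]
  · rw [if_neg hly]
    have hl : ¬((l : Int) = y) := by omega
    simp only [Finset.mem_insert, Prod.ext_iff]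
    simp [hl]

lemma setCell_mkVis (n m : Int) (s : Finset (Int × Int)) (x y : Int)
    (hx0 : 0 ≤ x) (hxn : x < n) (hy0 : 0 ≤ y) (hym : y < m) :
    pvSetCell (mkVis n m s) x y = mkVis n m (insert (x, y) s) := by
  simp only [pvSetCell, mkVis]
  rw [PySem.List.pySetD_of_nonneg _ _ hy0, PySem.List.pySetD_of_nonneg _ _ hx0,
    PySem.List.pyGetD_eq_getElem _ [] hx0 (by simp [PySem.List.length_pyRange_one]; omega)]
  apply List.ext_getElem (by simp)
  intro k hk1 hk2
  simp only [List.getElem_set, List.getElem_map, PySem.List.getElem_pyRange_one]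
  by_cases hkx : x.toNat = k
  · rw [if_pos hkx]
    subst hkx
    have hxx : (0 : Int) + ↑x.toNat = x := by omega
    rw [hxx]
    exact mkRow_set m x y s hy0 hym
  · rw [if_neg hkx]
    have hne : (0 : Int) + ↑k ≠ x := by omega
    exact (mkRow_insert_ne m x y _ s hne).symm


lemma rtg_avoid_insert (land : List (List Int)) (n m : Int) (avoid : Finset (Int × Int))
    (q : Int × Int) (a p : Int × Int)
    (h : Relation.ReflTransGen (Stp land n m avoid) a p) :
    Relation.ReflTransGen (Stp land n m (insert q avoid)) a p ∨ p = q ∨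
      ∃ c, adjB land n m q c = true ∧ c ∉ avoid ∧ c ≠ q ∧
        Relation.ReflTransGen (Stp land n m (insert q avoid)) c p := by
  induction h with
  | refl => exact Or.inl Relation.ReflTransGen.refl
  | @tail b c hab hbc ih =>
    by_cases hcq : c = q
    · exact Or.inr (Or.inl hcq)
    · have hcav : c ∉ insert q avoid := by
        simp [Finset.mem_insert, hcq, hbc.2]
      rcases ih with h1 | h2 | ⟨d, hd1, hd2, hd3, hd4⟩
      · exact Or.inl (h1.tail ⟨hbc.1, hcav⟩)
      · subst h2
        exact Or.inr (Or.inr ⟨c, hbc.1, hbc.2, hcq, Relation.ReflTransGen.refl⟩)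
      · exact Or.inr (Or.inr ⟨d, hd1, hd2, hd3, hd4.tail ⟨hbc.1, hcav⟩⟩)

lemma pop_avoid (seen Q N : Finset (Int × Int)) (q : Int × Int)
    (hQs : Q ⊆ seen) (hqQ : q ∈ Q) (hN : ∀ p ∈ N, p ∉ seen) :
    (seen ∪ N) \ ((Q.erase q) ∪ N) = insert q (seen \ Q) := by
  ext p
  simp only [Finset.mem_sdiff, Finset.mem_union, Finset.mem_insert, Finset.mem_erase, not_or,
    not_and]
  constructor
  · rintro ⟨h1 | h1, h2, h3⟩
    · by_cases hpq : p = q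
      · exact Or.inl hpq
      · exact Or.inr ⟨h1, fun hpQ => (h2 hpq) hpQ⟩
    · exact absurd h1 h3
  · rintro (hpq | ⟨hs, hnq⟩)
    · subst hpq
      exact ⟨Or.inl (hQs hqQ), fun h => absurd rfl h, fun h => hN p h (hQs hqQ)⟩
    · exact ⟨Or.inl hs, fun _ h => hnq h, fun h => hN p h hs⟩

lemma not_inReach_avoid (land : List (List Int)) (n m : Int) (avoid Q : Finset (Int × Int))
    (q : Int × Int) (hqa : q ∈ avoid) (hqQ : q ∉ Q) : ¬ InReach land n m avoid Q q := by
  rintro ⟨q0, h0, hr⟩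
  rcases Relation.ReflTransGen.cases_tail hr with h1 | ⟨c, _, hstep⟩
  · exact hqQ (h1 ▸ h0)
  · exact hstep.2 hqa

lemma reach_pop (land : List (List Int)) (n m : Int) (seen Q N : Finset (Int × Int))
    (q : Int × Int) (hQs : Q ⊆ seen) (hqQ : q ∈ Q)
    (hN : ∀ p, p ∈ N ↔ adjB land n m q p = true ∧ p ∉ seen) (p : Int × Int) :
    InReach land n m (seen \ Q) Q p ↔
      p = q ∨ InReach land n m (insert q (seen \ Q)) ((Q.erase q) ∪ N) p := by
  constructor
  · rintro ⟨q0, hq0, hr⟩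
    rcases rtg_avoid_insert land n m (seen \ Q) q q0 p hr with h1 | h2 | ⟨c, hc1, hc2, hc3, hc4⟩
    · by_cases hq0q : q0 = q
      · obtain rfl : q = q0 := hq0q.symm
        rcases Relation.ReflTransGen.cases_head h1 with rfl | ⟨c, hstep, hrest⟩
        · exact Or.inl rfl
        · refine Or.inr ⟨c, ?_, hrest⟩
          have hcq : c ≠ q := by
            intro h; subst h; exact hstep.2 (Finset.mem_insert_self _ _)
          by_cases hcQ : c ∈ Q
          · exact Finset.mem_union_left _ (Finset.mem_erase.mpr ⟨hcq, hcQ⟩)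
          · refine Finset.mem_union_right _ ((hN c).mpr ⟨hstep.1, ?_⟩)
            intro hcs
            exact hstep.2 (Finset.mem_insert_of_mem (Finset.mem_sdiff.mpr ⟨hcs, hcQ⟩))
      · exact Or.inr ⟨q0, Finset.mem_union_left _ (Finset.mem_erase.mpr ⟨hq0q, hq0⟩), h1⟩
    · exact Or.inl h2
    · refine Or.inr ⟨c, ?_, hc4⟩
      by_cases hcQ : c ∈ Q
      · exact Finset.mem_union_left _ (Finset.mem_erase.mpr ⟨hc3, hcQ⟩)
      · refine Finset.mem_union_right _ ((hN c).mpr ⟨hc1, ?_⟩)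
        intro hcs
        exact hc2 (Finset.mem_sdiff.mpr ⟨hcs, hcQ⟩)
  · rintro (rfl | ⟨q0, hq0, hr⟩)
    · exact ⟨p, hqQ, Relation.ReflTransGen.refl⟩
    · have hmono : Relation.ReflTransGen (Stp land n m (seen \ Q)) q0 p :=
        Relation.ReflTransGen.mono
          (fun a b hab => ⟨hab.1, fun h => hab.2 (Finset.mem_insert_of_mem h)⟩) hr
      rcases Finset.mem_union.mp hq0 with h1 | h1
      · exact ⟨q0, Finset.mem_of_mem_erase h1, hmono⟩
      · have h2 := (hN q0).mp h1
        have hstep : Stp land n m (seen \ Q) q q0 :=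
          ⟨h2.1, fun h => h2.2 (Finset.mem_sdiff.mp h).1⟩
        exact ⟨q, hqQ, (Relation.ReflTransGen.single hstep).trans hmono⟩


-- the neighbour cells that a pop of (x, y) enqueues, given the current seen-set
def newCells (land : List (List Int)) (n m : Int) (s : Finset (Int × Int))
    (cs : List (Int × Int)) : List (Int × Int) :=
  cs.filter (fun c => okB land n m c && !(decide (c ∈ s)))

lemma newCells_congr (land : List (List Int)) (n m : Int) (s : Finset (Int × Int))
    (c : Int × Int) (cs : List (Int × Int)) (hc : c ∉ cs) :
    newCells land n m (insert c s) cs = newCells land n m s cs := by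
  simp only [newCells]
  apply List.filter_congr
  intro e he
  have : e ≠ c := fun h => hc (h ▸ he)
  simp [Finset.mem_insert, this]

lemma mem_newCells (land : List (List Int)) (n m : Int) (s : Finset (Int × Int))
    (cs : List (Int × Int)) (p : Int × Int) :
    p ∈ newCells land n m s cs ↔ p ∈ cs ∧ okB land n m p = true ∧ p ∉ s := by
  simp [newCells, List.mem_filter, and_assoc]

lemma nodup_newCells (land : List (List Int)) (n m : Int) (s : Finset (Int × Int))
    (cs : List (Int × Int)) (h : cs.Nodup) : (newCells land n m s cs).Nodup :=
  h.filter _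

-- A's neighbour candidates (dxs/dys order) and B's
def candsA (x y : Int) : List (Int × Int) :=
  List.map (fun d => (x + d.1, y + d.2)) [((-1 : Int), (0 : Int)), (1, 0), (0, 1), (0, -1)]
def candsB (x y : Int) : List (Int × Int) := [(x - 1, y), (x + 1, y), (x, y - 1), (x, y + 1)]

lemma candsA_nodup (x y : Int) : (candsA x y).Nodup := by
  simp [candsA, Prod.ext_iff] <;> omega

lemma candsB_nodup (x y : Int) : (candsB x y).Nodup := by
  simp [candsB, Prod.ext_iff] <;> omega

lemma mem_candsA (x y : Int) (p : Int × Int) :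
    p ∈ candsA x y ↔ (p.1 - x).natAbs + (p.2 - y).natAbs = 1 := by
  rcases p with ⟨a, b⟩
  simp [candsA, Prod.ext_iff] <;> omega

lemma mem_candsB (x y : Int) (p : Int × Int) :
    p ∈ candsB x y ↔ (p.1 - x).natAbs + (p.2 - y).natAbs = 1 := by
  rcases p with ⟨a, b⟩
  simp [candsB, Prod.ext_iff] <;> omega

-- the enqueued neighbours are exactly the N required by reach_pop
lemma newCells_spec (land : List (List Int)) (n m : Int) (s : Finset (Int × Int))
    (x y : Int) (hq : okB land n m (x, y) = true) (cs : List (Int × Int))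
    (hcs : ∀ p, p ∈ cs ↔ (p.1 - x).natAbs + (p.2 - y).natAbs = 1) (p : Int × Int) :
    p ∈ (newCells land n m s cs).toFinset ↔ adjB land n m (x, y) p = true ∧ p ∉ s := by
  rw [List.mem_toFinset, mem_newCells, hcs]
  simp only [adjB, Bool.and_eq_true, decide_eq_true_eq]
  constructor
  · rintro ⟨h1, h2, h3⟩
    exact ⟨⟨⟨hq, h2⟩, h1⟩, h3⟩
  · rintro ⟨⟨⟨_, h2⟩, h1⟩, h3⟩
    exact ⟨h1, h2, h3⟩

lemma fold_init_swap {α β : Type} (op : β → β → β) [hc : Std.Commutative op]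
    [ha : Std.Associative op] (f : α → β) (b y : β) (s : Finset α) [DecidableEq α] :
    Finset.fold op (op b y) f s = op y (Finset.fold op b f s) := by
  induction s using Finset.induction_on with
  | empty => simp [Finset.fold_empty, hc.comm]
  | insert a s ha' ih =>
    rw [Finset.fold_insert ha', Finset.fold_insert ha', ih,
      ← ha.assoc, hc.comm (f a) y, ha.assoc]

-- A's inner neighbour loop
lemma nbrFoldA (land : List (List Int)) (n m x y : Int) :
    ∀ (ds : List (Int × Int)) (q : List (Int × Int)) (s : Finset (Int × Int)),
    (ds.map (fun d => (x + d.1, y + d.2))).Nodup →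
    ds.foldl (fun (st : List (Int × Int) × List (List Int)) d =>
        let nx := x + d.1
        let ny := y + d.2
        if (0 ≤ nx ∧ nx < n ∧ 0 ≤ ny ∧ ny < m) ∧ pvAt land nx ny = some 1 ∧ pvAt st.2 nx ny = some 0
        then (st.1 ++ [(nx, ny)], pvSetCell st.2 nx ny)
        else st) (q, mkVis n m s)
      = (q ++ newCells land n m s (ds.map (fun d => (x + d.1, y + d.2))),
         mkVis n m (s ∪ (newCells land n m s (ds.map (fun d => (x + d.1, y + d.2)))).toFinset)) := by
  intro ds
  induction ds with
  | nil => intro q s _; simp [newCells]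
  | cons d ds ih =>
    intro q s hnd
    simp only [List.map_cons, List.nodup_cons] at hnd
    obtain ⟨hd1, hd2⟩ := hnd
    set c : Int × Int := (x + d.1, y + d.2) with hc
    by_cases hok : okB land n m c = true ∧ c ∉ s
    · have hrange : 0 ≤ c.1 ∧ c.1 < n ∧ 0 ≤ c.2 ∧ c.2 < m := by
        have := hok.1
        simp only [okB, Bool.and_eq_true, decide_eq_true_eq] at this
        exact this.1
      have hland : pvAt land c.1 c.2 = some 1 := by
        have := hok.1
        simp only [okB, Bool.and_eq_true, decide_eq_true_eq] at this
        exact this.2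
      have hvis : pvAt (mkVis n m s) c.1 c.2 = some 0 := by
        rw [at_mkVis n m s c.1 c.2 hrange.1 hrange.2.1 hrange.2.2.1 hrange.2.2.2]
        simp [hok.2]
      simp only [List.foldl_cons]
      rw [if_pos ⟨hrange, hland, hvis⟩]
      rw [setCell_mkVis n m s c.1 c.2 hrange.1 hrange.2.1 hrange.2.2.1 hrange.2.2.2]
      rw [ih (q ++ [c]) (insert (c.1, c.2) s) hd2]
      rw [newCells_congr land n m s (c.1, c.2) _ (by simpa using hd1)]
      have hcells : newCells land n m s (c :: ds.map (fun d => (x + d.1, y + d.2)))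
          = c :: newCells land n m s (ds.map (fun d => (x + d.1, y + d.2))) := by
        simp only [newCells, List.filter_cons]
        rw [if_pos (by simp [hok.1, hok.2])]
      simp only [List.map_cons]
      rw [hcells]
      simp only [Prod.mk.injEq]
      constructor
      · simp
      · congr 1
        ext p
        simp only [List.toFinset_cons, Finset.mem_union, Finset.mem_insert, List.mem_toFinset]
        tauto
    · have hfail : ¬ ((0 ≤ c.1 ∧ c.1 < n ∧ 0 ≤ c.2 ∧ c.2 < m) ∧ pvAt land c.1 c.2 = some 1
          ∧ pvAt (mkVis n m s) c.1 c.2 = some 0) := by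
        rintro ⟨h1, h2, h3⟩
        apply hok
        constructor
        · simp only [okB, Bool.and_eq_true, decide_eq_true_eq]
          exact ⟨h1, h2⟩
        · rw [at_mkVis n m s c.1 c.2 h1.1 h1.2.1 h1.2.2.1 h1.2.2.2] at h3
          intro hmem
          rw [if_pos hmem] at h3
          exact absurd (Option.some.inj h3) (by norm_num)
      simp only [List.foldl_cons]
      rw [if_neg hfail]
      rw [ih q s hd2]
      have hcells : newCells land n m s (c :: ds.map (fun d => (x + d.1, y + d.2)))
          = newCells land n m s (ds.map (fun d => (x + d.1, y + d.2))) := by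
        simp only [newCells, List.filter_cons]
        rw [if_neg (by
          simp only [Bool.and_eq_true, Bool.not_eq_eq_eq_not, Bool.not_true, decide_eq_false_iff_not,
            not_and, Bool.not_eq_true']
          intro h1
          simp only [decide_eq_false_iff_not, Decidable.not_not]
          by_contra h2
          exact hok ⟨h1, by simpa using h2⟩)]
      simp only [List.map_cons]
      rw [hcells]

-- B's inner neighbour loop
lemma nbrFoldB (land : List (List Int)) (n m : Int) :
    ∀ (cs : List (Int × Int)) (sL : PySem.Set (Int × Int)) (sF : Finset (Int × Int))
      (q : List (Int × Int)),
    (∀ p, p ∈ sL ↔ p ∈ sF) → cs.Nodup →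
    (cs.foldl (fun (st : PySem.Set (Int × Int) × List (Int × Int)) c =>
        if (0 ≤ c.1 ∧ c.1 < n ∧ 0 ≤ c.2 ∧ c.2 < m) ∧ pvAt land c.1 c.2 = some 1 ∧ ¬ c ∈ st.1
        then (PySem.Set.add st.1 c, st.2 ++ [c])
        else st) (sL, q)).2 = q ++ newCells land n m sF cs ∧
    (∀ p, p ∈ (cs.foldl (fun (st : PySem.Set (Int × Int) × List (Int × Int)) c =>
        if (0 ≤ c.1 ∧ c.1 < n ∧ 0 ≤ c.2 ∧ c.2 < m) ∧ pvAt land c.1 c.2 = some 1 ∧ ¬ c ∈ st.1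
        then (PySem.Set.add st.1 c, st.2 ++ [c])
        else st) (sL, q)).1 ↔ p ∈ sF ∨ p ∈ newCells land n m sF cs) := by
  intro cs
  induction cs with
  | nil =>
    intro sL sF q hrel _
    constructor
    · simp [newCells]
    · intro p; simp [newCells, hrel p]
  | cons c cs ih =>
    intro sL sF q hrel hnd
    simp only [List.nodup_cons] at hnd
    obtain ⟨hd1, hd2⟩ := hnd
    by_cases hok : okB land n m c = true ∧ c ∉ sF
    · have hrange : 0 ≤ c.1 ∧ c.1 < n ∧ 0 ≤ c.2 ∧ c.2 < m := by
        have := hok.1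
        simp only [okB, Bool.and_eq_true, decide_eq_true_eq] at this
        exact this.1
      have hland : pvAt land c.1 c.2 = some 1 := by
        have := hok.1
        simp only [okB, Bool.and_eq_true, decide_eq_true_eq] at this
        exact this.2
      have hmem : ¬ c ∈ sL := fun h => hok.2 ((hrel c).mp h)
      simp only [List.foldl_cons]
      rw [if_pos ⟨hrange, hland, hmem⟩]
      have hrel' : ∀ p, p ∈ PySem.Set.add sL c ↔ p ∈ insert c sF := by
        intro p
        rw [PySem.Set.mem_add, Finset.mem_insert, hrel p]
        tauto
      obtain ⟨ihA, ihB⟩ := ih (PySem.Set.add sL c) (insert c sF) (q ++ [c]) hrel' hd2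
      rw [newCells_congr land n m sF c cs hd1] at ihA ihB
      have hcells : newCells land n m sF (c :: cs) = c :: newCells land n m sF cs := by
        simp only [newCells, List.filter_cons]
        rw [if_pos (by simp [hok.1, hok.2])]
      constructor
      · rw [ihA, hcells]
        simp
      · intro p
        rw [ihB p, hcells]
        simp only [Finset.mem_insert, List.mem_cons]
        tauto
    · have hfail : ¬ ((0 ≤ c.1 ∧ c.1 < n ∧ 0 ≤ c.2 ∧ c.2 < m) ∧ pvAt land c.1 c.2 = some 1
          ∧ ¬ c ∈ sL) := by
        rintro ⟨h1, h2, h3⟩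
        apply hok
        refine ⟨by simp only [okB, Bool.and_eq_true, decide_eq_true_eq]; exact ⟨h1, h2⟩, ?_⟩
        intro hmem
        exact h3 ((hrel c).mpr hmem)
      simp only [List.foldl_cons]
      rw [if_neg hfail]
      have hcells : newCells land n m sF (c :: cs) = newCells land n m sF cs := by
        simp only [newCells, List.filter_cons]
        rw [if_neg (by
          simp only [Bool.and_eq_true, Bool.not_eq_eq_eq_not, Bool.not_true, decide_eq_false_iff_not,
            not_and, Bool.not_eq_true']
          intro h1
          simp only [decide_eq_false_iff_not, Decidable.not_not]
          by_contra h2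
          exact hok ⟨h1, by simpa using h2⟩)]
      rw [hcells]
      exact ih sL sF q hrel hd2


lemma reachF_empty (land : List (List Int)) (n m : Int) (avoid : Finset (Int × Int)) :
    reachF land n m avoid ∅ = ∅ := by
  ext p
  rw [mem_reachF]
  simp [InReach]

lemma mem_reachF_of_mem (land : List (List Int)) (n m : Int) (avoid Q : Finset (Int × Int))
    (q : Int × Int) (h : q ∈ Q) : q ∈ reachF land n m avoid Q := by
  rw [mem_reachF]
  exact ⟨q, h, Relation.ReflTransGen.refl⟩

lemma bfsLoop_spec (land : List (List Int)) (n m : Int) :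
    ∀ (fuel : Nat) (queue : List (Int × Int)) (seen : Finset (Int × Int)) (mn mx cnt : Int),
    queue.Nodup →
    (∀ p ∈ queue, okB land n m p = true) →
    (∀ p ∈ queue, p ∈ seen) →
    queue.length + ((okFinset land n m) \ seen).card ≤ fuel →
    pvBfsLoop land n m fuel queue (mkVis n m seen) mn mx cnt =
      (mkVis n m (seen ∪ reachF land n m (seen \ queue.toFinset) queue.toFinset),
       Finset.fold min mn (fun p => p.2) (reachF land n m (seen \ queue.toFinset) queue.toFinset),
       Finset.fold max mx (fun p => p.2) (reachF land n m (seen \ queue.toFinset) queue.toFinset),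
       cnt + (reachF land n m (seen \ queue.toFinset) queue.toFinset).card) := by
  intro fuel
  induction fuel with
  | zero =>
    intro queue seen mn mx cnt hnd hok hsub hfuel
    cases queue with
    | nil => simp [pvBfsLoop, reachF_empty]
    | cons a l =>
      exfalso
      simp only [List.length_cons] at hfuel
      omega
  | succ f ih =>
    intro queue seen mn mx cnt hnd hok hsub hfuel
    cases queue with
    | nil => simp [pvBfsLoop, reachF_empty]
    | cons hd rest =>
      obtain ⟨x, y⟩ := hd
      have hqok : okB land n m (x, y) = true := hok _ (by simp)
      have hqseen : (x, y) ∈ seen := hsub _ (by simp)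
      simp only [List.nodup_cons] at hnd
      obtain ⟨hxr, hndr⟩ := hnd
      simp only [pvBfsLoop]
      rw [nbrFoldA land n m x y [((-1 : Int), (0 : Int)), (1, 0), (0, 1), (0, -1)] rest seen
        (candsA_nodup x y)]
      rw [show List.map (fun d => (x + d.1, y + d.2))
        [((-1 : Int), (0 : Int)), (1, 0), (0, 1), (0, -1)] = candsA x y from rfl]
      dsimp only
      have hNchar : ∀ p, p ∈ (newCells land n m seen (candsA x y)).toFinset ↔
          adjB land n m (x, y) p = true ∧ p ∉ seen :=
        newCells_spec land n m seen x y hqok (candsA x y) (mem_candsA x y)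
      set Nl := newCells land n m seen (candsA x y) with hNl
      set N : Finset (Int × Int) := Nl.toFinset with hNdef
      have hNnodup : Nl.Nodup := nodup_newCells land n m seen _ (candsA_nodup x y)
      have hNnotseen : ∀ p ∈ N, p ∉ seen := fun p hp => ((hNchar p).mp hp).2
      have hNok : ∀ p ∈ Nl, okB land n m p = true := by
        intro p hp
        have := (hNchar p).mp (List.mem_toFinset.mpr hp)
        simp only [adjB, Bool.and_eq_true] at this
        exact this.1.1.2
      have hNsub : N ⊆ okFinset land n m \ seen := by
        intro p hp
        exact Finset.mem_sdiff.mpr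
          ⟨okB_mem_okFinset land n m p (hNok p (List.mem_toFinset.mp hp)), hNnotseen p hp⟩
      have hdisj : List.Disjoint rest Nl := by
        intro p hp1 hp2
        exact hNnotseen p (List.mem_toFinset.mpr hp2) (hsub p (by simp [hp1]))
      have hcard : ((okFinset land n m) \ (seen ∪ N)).card
          = ((okFinset land n m) \ seen).card - Nl.length := by
        rw [show (okFinset land n m) \ (seen ∪ N) = ((okFinset land n m) \ seen) \ N by
          ext p; simp only [Finset.mem_sdiff, Finset.mem_union]; tauto]
        rw [Finset.card_sdiff, Finset.inter_eq_left.mpr hNsub,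
          List.toFinset_card_of_nodup hNnodup]
      have hlen : Nl.length ≤ ((okFinset land n m) \ seen).card := by
        calc Nl.length = N.card := (List.toFinset_card_of_nodup hNnodup).symm
        _ ≤ _ := Finset.card_le_card hNsub
      rw [ih (rest ++ Nl) (seen ∪ N) (min mn y) (max mx y) (cnt + 1)
        (hndr.append hNnodup hdisj)
        (by intro p hp
            rcases List.mem_append.mp hp with h | h
            · exact hok p (by simp [h])
            · exact hNok p h)
        (by intro p hp
            rcases List.mem_append.mp hp with h | h
            · exact Finset.mem_union_left _ (hsub p (by simp [h]))
            · exact Finset.mem_union_right _ (List.mem_toFinset.mpr h))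
        (by simp only [List.length_append, hcard]
            simp only [List.length_cons] at hfuel
            omega)]
      have hQ : ((x, y) :: rest).toFinset = insert (x, y) rest.toFinset := by simp
      have herase : (insert (x, y) rest.toFinset).erase (x, y) = rest.toFinset :=
        Finset.erase_insert (by simpa using hxr)
      have hQ' : (rest ++ Nl).toFinset = (insert (x, y) rest.toFinset).erase (x, y) ∪ N := by
        rw [List.toFinset_append, herase]
      have hQsub : insert (x, y) rest.toFinset ⊆ seen := by
        intro p hp
        rcases Finset.mem_insert.mp hp with rfl | h
        · exact hqseen
        · exact hsub p (by simp [List.mem_toFinset.mp h])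
      have havoid : (seen ∪ N) \ (rest ++ Nl).toFinset
          = insert (x, y) (seen \ insert (x, y) rest.toFinset) := by
        rw [hQ']
        exact pop_avoid seen _ N (x, y) hQsub (Finset.mem_insert_self _ _) hNnotseen
      set R' : Finset (Int × Int) :=
        reachF land n m ((seen ∪ N) \ (rest ++ Nl).toFinset) (rest ++ Nl).toFinset with hR'def
      have hqR' : (x, y) ∉ R' := by
        rw [hR'def, mem_reachF]
        apply not_inReach_avoid
        · rw [havoid]
          exact Finset.mem_insert_self _ _
        · rw [List.toFinset_append]
          simp only [Finset.mem_union, List.mem_toFinset]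
          rintro (h | h)
          · exact hxr h
          · exact hNnotseen _ (List.mem_toFinset.mpr h) hqseen
      have hR : reachF land n m (seen \ ((x, y) :: rest).toFinset) ((x, y) :: rest).toFinset
          = insert (x, y) R' := by
        ext p
        rw [Finset.mem_insert, mem_reachF, hR'def, mem_reachF, hQ, havoid, hQ']
        exact reach_pop land n m seen (insert (x, y) rest.toFinset) N (x, y) hQsub
          (Finset.mem_insert_self _ _) hNchar p
      have hNR' : N ⊆ R' := by
        intro p hp
        exact mem_reachF_of_mem land n m _ _ p
          (by rw [List.toFinset_append]; exact Finset.mem_union_right _ hp)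
      rw [hR]
      simp only [Prod.mk.injEq]
      refine ⟨?_, ?_, ?_, ?_⟩
      · congr 1
        ext p
        simp only [Finset.mem_union, Finset.mem_insert]
        constructor
        · rintro ((h | h) | h)
          · exact Or.inl h
          · exact Or.inr (Or.inr (hNR' h))
          · exact Or.inr (Or.inr h)
        · rintro (h | rfl | h)
          · exact Or.inl (Or.inl h)
          · exact Or.inl (Or.inl hqseen)
          · exact Or.inr h
      · rw [Finset.fold_insert hqR', fold_init_swap]
      · rw [Finset.fold_insert hqR', fold_init_swap]
      · rw [Finset.card_insert_of_notMem hqR']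
        push_cast
        ring

lemma dfsLoop_spec (land : List (List Int)) (n m : Int) :
    ∀ (fuel : Nat) (stack : List (Int × Int)) (sL : PySem.Set (Int × Int))
      (sF : Finset (Int × Int)) (cnt mn mx : Int),
    (∀ p, p ∈ sL ↔ p ∈ sF) →
    stack.Nodup →
    (∀ p ∈ stack, okB land n m p = true) →
    (∀ p ∈ stack, p ∈ sF) →
    stack.length + ((okFinset land n m) \ sF).card ≤ fuel →
    (pvDfsLoop land n m fuel stack sL cnt mn mx).2 =
      (cnt + (reachF land n m (sF \ stack.toFinset) stack.toFinset).card,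
       Finset.fold min mn (fun p => p.2) (reachF land n m (sF \ stack.toFinset) stack.toFinset),
       Finset.fold max mx (fun p => p.2) (reachF land n m (sF \ stack.toFinset) stack.toFinset)) ∧
    (∀ p, p ∈ (pvDfsLoop land n m fuel stack sL cnt mn mx).1 ↔
      p ∈ sF ∪ reachF land n m (sF \ stack.toFinset) stack.toFinset) := by
  intro fuel
  induction fuel with
  | zero =>
    intro stack sL sF cnt mn mx hrel hnd hok hsub hfuel
    cases stack with
    | nil =>
      refine ⟨by simp [pvDfsLoop, reachF_empty], ?_⟩
      intro p
      simp [pvDfsLoop, reachF_empty, hrel p]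
    | cons a l =>
      exfalso
      simp only [List.length_cons] at hfuel
      omega
  | succ f ih =>
    intro stack sL sF cnt mn mx hrel hnd hok hsub hfuel
    rcases List.eq_nil_or_concat stack with rfl | ⟨l, q, rfl⟩
    · refine ⟨by simp [pvDfsLoop, reachF_empty], ?_⟩
      intro p
      simp [pvDfsLoop, reachF_empty, hrel p]
    · obtain ⟨x, y⟩ := q
      simp only [List.concat_eq_append] at hnd hok hsub hfuel ⊢
      have hqok : okB land n m (x, y) = true := hok _ (by simp)
      have hqseen : (x, y) ∈ sF := hsub _ (by simp)
      have hnd' : l.Nodup ∧ (x, y) ∉ l := by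
        rw [List.nodup_append] at hnd
        exact ⟨hnd.1, fun h => hnd.2.2 _ h _ (by simp) rfl⟩
      obtain ⟨hndl, hxr⟩ := hnd'
      have hlast : (l ++ [((x : Int), (y : Int))]).getLast? = some (x, y) := by simp
      simp only [pvDfsLoop, hlast, List.dropLast_concat, List.concat_eq_append]
      rw [show [(x - 1, y), (x + 1, y), (x, y - 1), (x, y + 1)] = candsB x y from rfl]
      obtain ⟨hfold2, hfold1⟩ := nbrFoldB land n m (candsB x y) sL sF l hrel (candsB_nodup x y)
      have hNchar : ∀ p, p ∈ (newCells land n m sF (candsB x y)).toFinset ↔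
          adjB land n m (x, y) p = true ∧ p ∉ sF :=
        newCells_spec land n m sF x y hqok (candsB x y) (mem_candsB x y)
      set Nl := newCells land n m sF (candsB x y) with hNl
      set N : Finset (Int × Int) := Nl.toFinset with hNdef
      have hNnodup : Nl.Nodup := nodup_newCells land n m sF _ (candsB_nodup x y)
      have hNnotseen : ∀ p ∈ N, p ∉ sF := fun p hp => ((hNchar p).mp hp).2
      have hNok : ∀ p ∈ Nl, okB land n m p = true := by
        intro p hp
        have := (hNchar p).mp (List.mem_toFinset.mpr hp)
        simp only [adjB, Bool.and_eq_true] at this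
        exact this.1.1.2
      have hNsub : N ⊆ okFinset land n m \ sF := by
        intro p hp
        exact Finset.mem_sdiff.mpr
          ⟨okB_mem_okFinset land n m p (hNok p (List.mem_toFinset.mp hp)), hNnotseen p hp⟩
      have hcard : ((okFinset land n m) \ (sF ∪ N)).card
          = ((okFinset land n m) \ sF).card - Nl.length := by
        rw [show (okFinset land n m) \ (sF ∪ N) = ((okFinset land n m) \ sF) \ N by
          ext p; simp only [Finset.mem_sdiff, Finset.mem_union]; tauto]
        rw [Finset.card_sdiff, Finset.inter_eq_left.mpr hNsub,
          List.toFinset_card_of_nodup hNnodup]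
      have hlen : Nl.length ≤ ((okFinset land n m) \ sF).card := by
        calc Nl.length = N.card := (List.toFinset_card_of_nodup hNnodup).symm
        _ ≤ _ := Finset.card_le_card hNsub
      rw [hfold2]
      have hrel' : ∀ p, p ∈ (List.foldl (fun (st : PySem.Set (Int × Int) × List (Int × Int)) c =>
          if (0 ≤ c.1 ∧ c.1 < n ∧ 0 ≤ c.2 ∧ c.2 < m) ∧ pvAt land c.1 c.2 = some 1 ∧ ¬ c ∈ st.1
          then (PySem.Set.add st.1 c, st.2 ++ [c])
          else st) (sL, l) (candsB x y)).1 ↔ p ∈ sF ∪ N := by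
        intro p
        rw [hfold1 p]
        simp [Finset.mem_union, hNdef, List.mem_toFinset]
      obtain ⟨ih1, ih2⟩ := ih (l ++ Nl) _ (sF ∪ N) (cnt + 1) (min mn y) (max mx y) hrel'
        (hndl.append hNnodup (fun p hp1 hp2 =>
          hNnotseen p (List.mem_toFinset.mpr hp2) (hsub p (by simp [hp1]))))
        (by intro p hp
            rcases List.mem_append.mp hp with h | h
            · exact hok p (by simp [h])
            · exact hNok p h)
        (by intro p hp
            rcases List.mem_append.mp hp with h | h
            · exact Finset.mem_union_left _ (hsub p (by simp [h]))
            · exact Finset.mem_union_right _ (List.mem_toFinset.mpr h))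
        (by simp only [List.length_append, hcard]
            simp only [List.length_append, List.length_cons, List.length_nil] at hfuel
            omega)
      have hQ : (l ++ [((x : Int), (y : Int))]).toFinset = insert (x, y) l.toFinset := by
        simp [List.toFinset_append, Finset.union_singleton]
      have herase : (insert ((x : Int), (y : Int)) l.toFinset).erase (x, y) = l.toFinset :=
        Finset.erase_insert (by simpa using hxr)
      have hQ' : (l ++ Nl).toFinset = (insert ((x : Int), (y : Int)) l.toFinset).erase (x, y) ∪ N := by
        rw [List.toFinset_append, herase]
      have hQsub : insert ((x : Int), (y : Int)) l.toFinset ⊆ sF := by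
        intro p hp
        rcases Finset.mem_insert.mp hp with rfl | h
        · exact hqseen
        · exact hsub p (by simp [List.mem_toFinset.mp h])
      have havoid : (sF ∪ N) \ (l ++ Nl).toFinset
          = insert ((x : Int), (y : Int)) (sF \ insert (x, y) l.toFinset) := by
        rw [hQ']
        exact pop_avoid sF _ N (x, y) hQsub (Finset.mem_insert_self _ _) hNnotseen
      set R' : Finset (Int × Int) :=
        reachF land n m ((sF ∪ N) \ (l ++ Nl).toFinset) (l ++ Nl).toFinset with hR'def
      have hqR' : ((x : Int), (y : Int)) ∉ R' := by
        rw [hR'def, mem_reachF]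
        apply not_inReach_avoid
        · rw [havoid]
          exact Finset.mem_insert_self _ _
        · rw [List.toFinset_append]
          simp only [Finset.mem_union, List.mem_toFinset]
          rintro (h | h)
          · exact hxr h
          · exact hNnotseen _ (List.mem_toFinset.mpr h) hqseen
      have hR : reachF land n m (sF \ (l ++ [((x : Int), (y : Int))]).toFinset)
            (l ++ [((x : Int), (y : Int))]).toFinset = insert (x, y) R' := by
        ext p
        rw [Finset.mem_insert, mem_reachF, hR'def, mem_reachF, hQ, havoid, hQ']
        exact reach_pop land n m sF (insert (x, y) l.toFinset) N (x, y) hQsub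
          (Finset.mem_insert_self _ _) hNchar p
      have hNR' : N ⊆ R' := by
        intro p hp
        exact mem_reachF_of_mem land n m _ _ p
          (by rw [List.toFinset_append]; exact Finset.mem_union_right _ hp)
      rw [hR]
      constructor
      · rw [ih1]
        simp only [Prod.mk.injEq]
        refine ⟨?_, ?_, ?_⟩
        · rw [Finset.card_insert_of_notMem hqR']
          push_cast
          ring
        · rw [Finset.fold_insert hqR', fold_init_swap]
        · rw [Finset.fold_insert hqR', fold_init_swap]
      · intro p
        rw [ih2 p]
        simp only [Finset.mem_union, Finset.mem_insert]
        constructor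
        · rintro ((h | h) | h)
          · exact Or.inl h
          · exact Or.inr (Or.inr (hNR' h))
          · exact Or.inr (Or.inr h)
        · rintro (h | rfl | h)
          · exact Or.inl (Or.inl h)
          · exact Or.inl (Or.inl hqseen)
          · exact Or.inr h

lemma okFinset_card_le (land : List (List Int)) (n m : Int) :
    (okFinset land n m).card ≤ n.toNat * m.toNat := by
  calc (okFinset land n m).card ≤ ((Finset.Icc (0 : Int) (n - 1)) ×ˢ (Finset.Icc (0 : Int) (m - 1))).card :=
        Finset.card_filter_le _ _
    _ = n.toNat * m.toNat := by
        rw [Finset.card_product, Int.card_Icc, Int.card_Icc,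
          show n - 1 + 1 - (0 : Int) = n by ring, show m - 1 + 1 - (0 : Int) = m by ring]

lemma foldl_rel {α σ τ : Type} (P : σ → τ → Prop) (f : σ → α → σ) (g : τ → α → τ) :
    ∀ (l : List α) (s : σ) (t : τ), P s t →
    (∀ s t a, a ∈ l → P s t → P (f s a) (g t a)) →
    P (l.foldl f s) (l.foldl g t) := by
  intro l
  induction l with
  | nil => intro s t h _; exact h
  | cons a l ih =>
    intro s t h hstep
    exact ih (f s a) (g t a) (hstep s t a (by simp) h)
      (fun s t b hb hP => hstep s t b (by simp [hb]) hP)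

-- per-column oil total of the recorded components (B's summation)
def colHits (comps : List (Int × Int × Int)) (c : Int) : Int :=
  ((comps.filter (fun t => decide (t.2.1 ≤ c ∧ c ≤ t.2.2))).map (fun t => t.1)).sum

-- what A's result array looks like after processing the components in comps
def resultOf (m : Int) (comps : List (Int × Int × Int)) : List Int :=
  (PySem.List.pyRange 0 (m + 1) 1).map (fun c => colHits comps c)

lemma colHits_nil (c : Int) : colHits [] c = 0 := rfl

lemma colHits_append (comps : List (Int × Int × Int)) (k a b c : Int) :
    colHits (comps ++ [(k, a, b)]) c = colHits comps c + if a ≤ c ∧ c ≤ b then k else 0 := by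
  simp only [colHits, List.filter_append, List.map_append, List.sum_append, List.filter_cons,
    List.filter_nil]
  split_ifs with h1 h2 h2 <;> simp_all

lemma colHits_nonneg (comps : List (Int × Int × Int)) (c : Int)
    (h : ∀ t ∈ comps, 0 ≤ t.1) : 0 ≤ colHits comps c := by
  apply List.sum_nonneg
  intro x hx
  obtain ⟨t, ht, rfl⟩ := List.mem_map.mp hx
  exact h t (List.mem_of_mem_filter ht)

lemma colHits_top (comps : List (Int × Int × Int)) (m : Int)
    (h : ∀ t ∈ comps, t.2.2 < m) : colHits comps m = 0 := by
  have : comps.filter (fun t => decide (t.2.1 ≤ m ∧ m ≤ t.2.2)) = [] := by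
    rw [List.filter_eq_nil_iff]
    intro t ht
    simp only [decide_eq_true_eq, not_and]
    intro _
    have := h t ht
    omega
  unfold colHits
  rw [this]
  simp

lemma len_resultOf (m : Int) (comps : List (Int × Int × Int)) (hm : 0 ≤ m) :
    PySem.List.len (resultOf m comps) = m + 1 := by
  simp only [resultOf, PySem.List.len_eq, List.length_map, PySem.List.length_pyRange_one]
  omega

lemma pyGetD_pySetD_int (res : List Int) (a c v : Int) (ha : 0 ≤ a) (ha' : a < PySem.List.len res)
    (hc0 : 0 ≤ c) (hc : c < PySem.List.len res) :
    PySem.List.pyGetD (PySem.List.pySetD res a v) c 0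
      = if c = a then v else PySem.List.pyGetD res c 0 := by
  simp only [PySem.List.len_eq] at ha' hc
  rw [PySem.List.pySetD_of_nonneg _ _ ha,
    PySem.List.pyGetD_eq_getElem _ _ hc0 (by simp only [List.length_set]; omega),
    List.getElem_set]
  split_ifs with h1 h2 h2
  · rfl
  · exact absurd (by omega : c = a) h2
  · exact absurd (by omega : a.toNat = c.toNat) h1
  · rw [PySem.List.pyGetD_eq_getElem _ _ hc0 (by omega)]

lemma intervalAdd_spec (k : Int) :
    ∀ (cnt : Nat) (a : Int) (res : List Int), 0 ≤ a → a + cnt ≤ PySem.List.len res →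
    (PySem.List.pyRange a (a + cnt) 1).foldl
        (fun res c => PySem.List.pySetD res c (PySem.List.pyGetD res c 0 + k)) res
      = (PySem.List.pyRange 0 (PySem.List.len res) 1).map
          (fun c => PySem.List.pyGetD res c 0 + if a ≤ c ∧ c < a + cnt then k else 0) := by
  intro cnt
  induction cnt with
  | zero =>
    intro a res ha hlen
    rw [show a + (0 : Nat) = a by omega, PySem.List.pyRange_one_eq_nil (by omega)]
    simp only [List.foldl_nil]
    have h1 : (PySem.List.pyRange 0 (PySem.List.len res) 1).map
          (fun c => PySem.List.pyGetD res c 0 + if a ≤ c ∧ c < a then k else 0)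
        = (PySem.List.pyRange 0 (PySem.List.len res) 1).map
          (fun c => PySem.List.pyGetD res c 0) :=
      List.map_congr_left (fun c _ => by rw [if_neg (by omega)]; ring)
    rw [h1, PySem.List.map_pyGetD_pyRange_zero]
  | succ cnt ih =>
    intro a res ha hlen
    rw [show a + ((cnt : Nat) + 1 : Nat) = (a + 1) + (cnt : Nat) by push_cast; ring]
    rw [PySem.List.pyRange_one_cons (by omega), List.foldl_cons]
    rw [ih (a + 1) (PySem.List.pySetD res a (PySem.List.pyGetD res a 0 + k)) (by omega)
      (by rw [PySem.List.len_eq, PySem.List.pySetD_of_nonneg _ _ ha, List.length_set,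
        ← PySem.List.len_eq]; omega)]
    rw [show PySem.List.len (PySem.List.pySetD res a (PySem.List.pyGetD res a 0 + k))
      = PySem.List.len res by
        rw [PySem.List.len_eq, PySem.List.pySetD_of_nonneg _ _ ha, List.length_set,
          ← PySem.List.len_eq]]
    apply List.map_congr_left
    intro c hc
    rw [PySem.List.mem_pyRange_one] at hc
    rw [pyGetD_pySetD_int res a c _ ha (by omega) hc.1 hc.2]
    by_cases hca : c = a
    · subst hca
      rw [if_pos rfl, if_neg (by omega), if_pos (by constructor <;> omega)]
      ring
    · rw [if_neg hca]
      have hiff : (a + 1 ≤ c ∧ c < a + 1 + (cnt : Int)) ↔ (a ≤ c ∧ c < a + 1 + (cnt : Int)) := by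
        constructor <;> (intro h; exact ⟨by omega, h.2⟩)
      rw [if_congr hiff rfl rfl]

lemma stepResult (m : Int) (comps : List (Int × Int × Int)) (k a b : Int)
    (hm : 0 ≤ m) (h0 : 0 ≤ a) (hab : a ≤ b) (hbm : b < m) :
    (PySem.List.pyRange a (b + 1) 1).foldl
        (fun res c => PySem.List.pySetD res c (PySem.List.pyGetD res c 0 + k)) (resultOf m comps)
      = resultOf m (comps ++ [(k, a, b)]) := by
  have hcnt : b + 1 = a + (((b + 1 - a).toNat : Nat) : Int) := by omega
  rw [hcnt, intervalAdd_spec k (b + 1 - a).toNat a (resultOf m comps) h0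
    (by rw [len_resultOf m comps hm]; omega)]
  rw [len_resultOf m comps hm]
  conv_rhs => rw [resultOf]
  apply List.map_congr_left
  intro c hc
  rw [PySem.List.mem_pyRange_one] at hc
  rw [colHits_append]
  rw [show PySem.List.pyGetD (resultOf m comps) c 0 = colHits comps c by
    rw [resultOf]
    exact PySem.List.pyGetD_map_pyRange_of_nonneg _ _ _ _ hc.1 hc.2]
  congr 1
  exact if_congr (by constructor <;> (intro h; exact ⟨h.1, by omega⟩)) rfl rfl

lemma okB_snd_bounds (land : List (List Int)) (n m : Int) (p : Int × Int)
    (h : okB land n m p = true) : 0 ≤ p.2 ∧ p.2 < m := by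
  simp only [okB, Bool.and_eq_true, decide_eq_true_eq] at h
  exact ⟨h.1.2.2.1, h.1.2.2.2⟩

-- the simulation relation between A's and B's outer-loop states
def OuterInv (land : List (List Int)) (n m : Int) (sA : List (List Int) × List Int)
    (sB : PySem.Set (Int × Int) × List (Int × Int × Int)) : Prop :=
  ∃ sF : Finset (Int × Int),
    sA.1 = mkVis n m sF ∧ (∀ p, p ∈ sB.1 ↔ p ∈ sF) ∧ sA.2 = resultOf m sB.2 ∧
    ∀ t ∈ sB.2, 0 ≤ t.1 ∧ t.2.2 < m

lemma cellStep (land : List (List Int)) (n m : Int) (i j : Int)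
    (hi0 : 0 ≤ i) (hin : i < n) (hj0 : 0 ≤ j) (hjm : j < m)
    (sA : List (List Int) × List Int) (sB : PySem.Set (Int × Int) × List (Int × Int × Int))
    (hP : OuterInv land n m sA sB) :
    OuterInv land n m
      (if pvAt sA.1 i j = some 0 ∧ pvAt land i j = some 1 then pvBfs land n m i j sA.1 sA.2 else sA)
      (if pvAt land i j = some 1 ∧ ¬ (i, j) ∈ sB.1 then
        (let seen := PySem.Set.add sB.1 (i, j)
         let r := pvDfsLoop land n m (n.toNat * m.toNat + 1) [(i, j)] seen 0 j j
         (r.1, sB.2 ++ [(r.2.1, r.2.2.1, r.2.2.2)]))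
       else sB) := by
  obtain ⟨sF, hA1, hB1, hA2, hOK⟩ := hP
  by_cases hland : pvAt land i j = some 1
  swap
  · rw [if_neg (fun h => hland h.2), if_neg (fun h => hland h.1)]
    exact ⟨sF, hA1, hB1, hA2, hOK⟩
  by_cases hmem : (i, j) ∈ sF
  · rw [if_neg, if_neg]
    · exact ⟨sF, hA1, hB1, hA2, hOK⟩
    · rintro ⟨_, h2⟩
      exact h2 ((hB1 _).mpr hmem)
    · rintro ⟨h1, _⟩
      rw [hA1, at_mkVis n m sF i j hi0 hin hj0 hjm, if_pos hmem] at h1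
      exact absurd (Option.some.inj h1) (by norm_num)
  · have hokij : okB land n m (i, j) = true := by
      simp only [okB, Bool.and_eq_true, decide_eq_true_eq]
      exact ⟨⟨hi0, hin, hj0, hjm⟩, hland⟩
    rw [if_pos ⟨by rw [hA1, at_mkVis n m sF i j hi0 hin hj0 hjm, if_neg hmem], hland⟩,
      if_pos ⟨hland, fun h => hmem ((hB1 _).mp h)⟩]
    have hfuel : (1 : Nat) + ((okFinset land n m) \ insert (i, j) sF).card
        ≤ n.toNat * m.toNat + 1 := by
      have h1 : ((okFinset land n m) \ insert (i, j) sF).card ≤ (okFinset land n m).card :=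
        Finset.card_le_card (Finset.sdiff_subset)
      have h2 := okFinset_card_le land n m
      omega
    have hsingle : ∀ p ∈ [((i : Int), (j : Int))], okB land n m p = true := by
      intro p hp
      rw [List.mem_singleton] at hp
      subst hp
      exact hokij
    have hseedok : ∀ q ∈ ([((i : Int), (j : Int))]).toFinset, okB land n m q = true := by
      intro q hq
      rw [List.mem_toFinset] at hq
      exact hsingle q hq
    have hbfs := bfsLoop_spec land n m (n.toNat * m.toNat + 1) [(i, j)] (insert (i, j) sF) j j 0
      (by simp) hsingle
      (by intro p hp; rw [List.mem_singleton] at hp; subst hp; exact Finset.mem_insert_self _ _)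
      (by simpa using hfuel)
    have hrel' : ∀ p, p ∈ PySem.Set.add sB.1 (i, j) ↔ p ∈ insert (i, j) sF := by
      intro p
      rw [PySem.Set.mem_add, Finset.mem_insert, hB1 p]
      tauto
    have hdfs := dfsLoop_spec land n m (n.toNat * m.toNat + 1) [(i, j)] (PySem.Set.add sB.1 (i, j))
      (insert (i, j) sF) 0 j j hrel' (by simp) hsingle
      (by intro p hp; rw [List.mem_singleton] at hp; subst hp; exact Finset.mem_insert_self _ _)
      (by simpa using hfuel)
    set C : Finset (Int × Int) :=
      reachF land n m (insert (i, j) sF \ ([((i : Int), (j : Int))]).toFinset)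
        ([((i : Int), (j : Int))]).toFinset with hCdef
    have hCok : ∀ p ∈ C, okB land n m p = true := fun p hp =>
      reachF_subset_ok land n m _ _ hseedok p hp
    have hmn0 : 0 ≤ Finset.fold min j (fun p => p.2) C := by
      rw [Finset.le_fold_min]
      exact ⟨hj0, fun p hp => (okB_snd_bounds land n m p (hCok p hp)).1⟩
    have hmxm : Finset.fold max j (fun p => p.2) C < m := by
      have : Finset.fold max j (fun p => p.2) C ≤ m - 1 := by
        rw [Finset.fold_max_le]
        exact ⟨by omega, fun p hp => by
          have := (okB_snd_bounds land n m p (hCok p hp)).2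
          omega⟩
      omega
    have hmnmx : Finset.fold min j (fun p => p.2) C ≤ Finset.fold max j (fun p => p.2) C := by
      have h1 : Finset.fold min j (fun p => p.2) C ≤ j := (Finset.fold_min_le j).mpr (Or.inl le_rfl)
      have h2 : j ≤ Finset.fold max j (fun p => p.2) C := (Finset.le_fold_max j).mpr (Or.inl le_rfl)
      omega
    simp only [pvBfs]
    rw [hA1, setCell_mkVis n m sF i j hi0 hin hj0 hjm, hbfs]
    have hd1 : (pvDfsLoop land n m (n.toNat * m.toNat + 1) [((i : Int), (j : Int))]
        (PySem.Set.add sB.1 (i, j)) 0 j j).2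
        = (0 + (C.card : Int), Finset.fold min j (fun p => p.2) C,
           Finset.fold max j (fun p => p.2) C) := hdfs.1
    refine ⟨insert (i, j) sF ∪ C, ?_, ?_, ?_, ?_⟩
    · rfl
    · intro p
      exact hdfs.2 p
    · show (PySem.List.pyRange (Finset.fold min j (fun p => p.2) C)
          ((Finset.fold max j (fun p => p.2) C) + 1) 1).foldl _ sA.2
        = resultOf m (sB.2 ++ [_])
      rw [hA2, hd1]
      exact stepResult m sB.2 (0 + (C.card : Int)) _ _ (by omega) hmn0 hmnmx hmxm
    · intro t ht
      rcases List.mem_append.mp ht with h | h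
      · exact hOK t h
      · rw [List.mem_singleton] at h
        subst h
        rw [hd1]
        constructor
        · have : (0 : Int) ≤ (C.card : Int) := by positivity
          simpa using this
        · exact hmxm

lemma ite_max (b s : Int) : (if b < s then s else b) = max b s := by
  rw [max_def]
  split_ifs <;> omega

lemma foldl_ite_max (l : List Int) (b : Int) :
    l.foldl (fun best s => if best < s then s else best) b = l.foldl max b := by
  have h : (fun (best s : Int) => if best < s then s else best) = max := by
    funext b s
    exact ite_max b s
  rw [h]

lemma max_append_zero (l : List Int) (h : ∀ x ∈ l, 0 ≤ x) :
    (PySem.List.max? (l ++ [(0 : Int)]) (fun v => v)).getD 0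
      = l.foldl (fun best s => if best < s then s else best) 0 := by
  rw [foldl_ite_max]
  cases l with
  | nil => simp [PySem.List.max?_id_cons]
  | cons x t =>
    rw [List.cons_append, PySem.List.max?_id_cons]
    simp only [Option.getD_some]
    rw [List.foldl_append]
    simp only [List.foldl_cons, List.foldl_nil]
    have hx : 0 ≤ x := h x (by simp)
    rw [max_eq_left (le_trans hx (PySem.List.le_foldl_max t x).1), max_eq_right hx]

lemma finalMax (m : Int) (comps : List (Int × Int × Int)) (hm : 0 ≤ m)
    (hOK : ∀ t ∈ comps, 0 ≤ t.1 ∧ t.2.2 < m) :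
    (PySem.List.max? (resultOf m comps) (fun v => v)).getD 0
      = (PySem.List.pyRange 0 m 1).foldl
          (fun (best : Int) c =>
            let s := ((comps.filter (fun t => decide (t.2.1 ≤ c ∧ c ≤ t.2.2))).map
              (fun t => t.1)).sum
            if best < s then s else best) 0 := by
  have hsplit : resultOf m comps
      = (PySem.List.pyRange 0 m 1).map (fun c => colHits comps c) ++ [(0 : Int)] := by
    rw [resultOf, PySem.List.pyRange_one_succ_right hm, List.map_append]
    simp [colHits_top comps m (fun t ht => (hOK t ht).2)]
  rw [hsplit]
  rw [max_append_zero _ (by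
    intro x hx
    obtain ⟨c, _, rfl⟩ := List.mem_map.mp hx
    exact colHits_nonneg comps c (fun t ht => (hOK t ht).1))]
  rw [List.foldl_map]
  rfl

-- ===== VERDICT (by name: the statement is the Claim_ definition above) =====
theorem solution_spec : Claim_equal_solution := by
  unfold Claim_equal_solution Spec_solution
  intro land _ _
  unfold solution solution_alt
  cases hland : PySem.List.pyGet? land 0 with
  | none => rfl
  | some row0 =>
    dsimp only
    have hm0 : (0 : Int) ≤ PySem.List.len row0 := by
      rw [PySem.List.len_eq]
      positivity
    have hinit : OuterInv land (PySem.List.len land) (PySem.List.len row0)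
        ((PySem.List.pyRange 0 (PySem.List.len land) 1).map
           (fun _ => (PySem.List.pyRange 0 (PySem.List.len row0) 1).map (fun _ => (0 : Int))),
         (PySem.List.pyRange 0 (PySem.List.len row0 + 1) 1).map (fun _ => (0 : Int)))
        (PySem.Set.empty, []) := by
      refine ⟨∅, ?_, ?_, ?_, ?_⟩
      · simp [mkVis]
      · intro p
        simp [PySem.Set.empty]
      · simp [resultOf, colHits_nil]
      · simp
    have hfold := foldl_rel (OuterInv land (PySem.List.len land) (PySem.List.len row0))
      (fun (s : List (List Int) × List Int) i =>
        (PySem.List.pyRange 0 (PySem.List.len row0) 1).foldl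
          (fun (s : List (List Int) × List Int) j =>
            if pvAt s.1 i j = some 0 ∧ pvAt land i j = some 1
            then pvBfs land (PySem.List.len land) (PySem.List.len row0) i j s.1 s.2
            else s) s)
      (fun (s : PySem.Set (Int × Int) × List (Int × Int × Int)) i =>
        (PySem.List.pyRange 0 (PySem.List.len row0) 1).foldl
          (fun (s : PySem.Set (Int × Int) × List (Int × Int × Int)) j =>
            if pvAt land i j = some 1 ∧ ¬ (i, j) ∈ s.1 then
              let seen := PySem.Set.add s.1 (i, j)
              let r := pvDfsLoop land (PySem.List.len land) (PySem.List.len row0)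
                ((PySem.List.len land).toNat * (PySem.List.len row0).toNat + 1) [(i, j)] seen 0 j j
              (r.1, s.2 ++ [(r.2.1, r.2.2.1, r.2.2.2)])
            else s) s)
      (PySem.List.pyRange 0 (PySem.List.len land) 1)
      ((PySem.List.pyRange 0 (PySem.List.len land) 1).map
         (fun _ => (PySem.List.pyRange 0 (PySem.List.len row0) 1).map (fun _ => (0 : Int))),
       (PySem.List.pyRange 0 (PySem.List.len row0 + 1) 1).map (fun _ => (0 : Int)))
      (PySem.Set.empty, []) hinit
      (by
        intro sA sB i hi hP
        refine foldl_rel (OuterInv land (PySem.List.len land) (PySem.List.len row0)) _ _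
          (PySem.List.pyRange 0 (PySem.List.len row0) 1) sA sB hP ?_
        intro sA' sB' j hj hP'
        rw [PySem.List.mem_pyRange_one] at hi hj
        exact cellStep land _ _ i j hi.1 hi.2 hj.1 hj.2 sA' sB' hP')
    obtain ⟨sF, h1, h2, h3, h4⟩ := hfold
    rw [h3]
    exact finalMax _ _ hm0 h4
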